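-- pv_equiv track=rewrite | github.com/zuuky/jetbrains_plugin | sweep_autocomplete_servers/autocomplete/next_edit_autocomplete.py | find_ghost_text_non_local
-- ===== SOURCE A (Python) =====
-- def get_ghost_text_with_location(
--     completion: str, cleaned_code_block: str, relative_cursor_position: int
-- ) -> str:
--     prefix = cleaned_code_block[:relative_cursor_position]
--     suffix = cleaned_code_block[relative_cursor_position:]
--     if completion.startswith(prefix) and completion.endswith(suffix):
--         # Handle empty suffix case: -0 would slice to beginning, so use conditional
--         if suffix:
--             ghost_text = completion[len(prefix) : -len(suffix)]
--         else:
--             ghost_text = completion[len(prefix) :]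
--         if ghost_text:
--             return ghost_text
--     return ""
--
-- def find_ghost_text_non_local(
--     completion: str, cleaned_code_block: str, relative_cursor_position: int
-- ) -> tuple[str, int]:
--     if len(cleaned_code_block) > len(completion):
--         return "", -1
--
--     # Find all valid ghost text positions and prioritize the one with the longest prefix match
--     valid_positions = []
--     # Check all positions including len(cleaned_code_block) for empty suffix case
--     for pos in range(len(cleaned_code_block) + 1):
--         ghost_text = get_ghost_text_with_location(completion, cleaned_code_block, pos)
--         if ghost_text:
--             valid_positions.append((pos, ghost_text))
--
--     if valid_positions:
--         # Prioritize the position with the longest prefix (highest position value)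
--         # This ensures we match the longest common prefix before the insertion
--         best_position, best_ghost_text = max(valid_positions, key=lambda x: x[0])
--         return best_ghost_text, best_position
--
--     return "", -1
-- ===== SOURCE B (Python) =====
-- def find_ghost_text_non_local(completion, cleaned_code_block, relative_cursor_position):
--     n = len(completion)
--     m = len(cleaned_code_block)
--     if m >= n:
--         return "", -1
--     p = 0
--     while p < m and completion[p] == cleaned_code_block[p]:
--         p += 1
--     s = 0
--     while s < m and completion[n - 1 - s] == cleaned_code_block[m - 1 - s]:
--         s += 1
--     if m - p <= s:
--         return completion[p : p + (n - m)], p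
--     return "", -1
-- ===== Notes on version B (the rewrite author's own statement) =====
-- stated objective: faster
-- what changed: A tries every cursor position 0..len(code), rebuilding prefix/suffix slices and re-checking startswith/endswith at each (quadratic); B computes the common-prefix length P and common-suffix length S in one linear pass each and returns directly the best position P with ghost text completion[P:P+len(completion)-len(code)] when len(code)-P <= S, else ('', -1).
import Mathlib
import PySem

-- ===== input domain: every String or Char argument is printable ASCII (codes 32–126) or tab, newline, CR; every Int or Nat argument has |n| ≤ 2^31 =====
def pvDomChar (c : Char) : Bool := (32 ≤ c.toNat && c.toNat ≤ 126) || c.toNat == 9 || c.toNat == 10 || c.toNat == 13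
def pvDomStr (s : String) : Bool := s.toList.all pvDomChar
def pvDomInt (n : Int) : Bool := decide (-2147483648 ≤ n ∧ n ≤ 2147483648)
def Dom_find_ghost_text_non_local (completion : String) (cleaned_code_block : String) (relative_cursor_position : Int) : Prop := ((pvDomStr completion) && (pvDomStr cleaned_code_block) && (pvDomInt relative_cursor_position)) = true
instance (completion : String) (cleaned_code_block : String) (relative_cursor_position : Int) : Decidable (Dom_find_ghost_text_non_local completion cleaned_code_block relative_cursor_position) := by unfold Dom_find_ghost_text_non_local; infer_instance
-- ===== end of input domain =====

-- B replaces A's quadratic scan of every insertion position by one linear common-prefix /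
-- common-suffix computation (objective: faster, asymptotic).

-- ===== PORT A =====
def get_ghost_text_with_location (completion : String) (cleaned_code_block : String)
    (relative_cursor_position : Int) : String :=
  let prefix_ := PySem.Str.slice cleaned_code_block none (some relative_cursor_position)
  let suffix := PySem.Str.slice cleaned_code_block (some relative_cursor_position) none
  if PySem.Str.startswith completion prefix_ && PySem.Str.endswith completion suffix then
    let ghost_text :=
      if suffix ≠ "" then
        PySem.Str.slice completion (some (PySem.Str.len prefix_)) (some (-(PySem.Str.len suffix)))
      else
        PySem.Str.slice completion (some (PySem.Str.len prefix_)) none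
    if ghost_text ≠ "" then ghost_text else ""
  else ""

def find_ghost_text_non_local (completion : String) (cleaned_code_block : String) (relative_cursor_position : Int) : String × Int :=
  if PySem.Str.len cleaned_code_block > PySem.Str.len completion then ("", -1)
  else
    let valid_positions : List (Int × String) :=
      (PySem.List.pyRange 0 (PySem.Str.len cleaned_code_block + 1) 1).foldl
        (fun acc pos =>
          let ghost_text := get_ghost_text_with_location completion cleaned_code_block pos
          if ghost_text ≠ "" then acc ++ [(pos, ghost_text)] else acc) []
    match PySem.List.max? valid_positions (fun x => x.1) with
    | some best => (best.2, best.1)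
    | none => ("", -1)

-- ===== PORT B =====
-- B's while loop 'advance while the characters agree' as structural recursion
def pvPfxLen : List Char → List Char → Nat
  | a :: as, b :: bs => if a = b then pvPfxLen as bs + 1 else 0
  | _, _ => 0

def find_ghost_text_non_local_alt (completion : String) (cleaned_code_block : String) (relative_cursor_position : Int) : String × Int :=
  let cl := completion.toList
  let dl := cleaned_code_block.toList
  let n := cl.length
  let m := dl.length
  if m ≥ n then ("", -1)
  else
    let p := pvPfxLen cl dl
    let s := pvPfxLen cl.reverse dl.reverse
    if m - p ≤ s then (String.ofList ((cl.drop p).take (n - m)), (p : Int))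
    else ("", -1)

-- ===== PRECONDITION & SPEC =====
def Spec_find_ghost_text_non_local (completion : String) (cleaned_code_block : String) (relative_cursor_position : Int) (out : String × Int) : Prop := out = find_ghost_text_non_local_alt completion cleaned_code_block relative_cursor_position
instance (completion : String) (cleaned_code_block : String) (relative_cursor_position : Int) (out : String × Int) : Decidable (Spec_find_ghost_text_non_local completion cleaned_code_block relative_cursor_position out) := by unfold Spec_find_ghost_text_non_local; infer_instance

-- ===== CLAIM (what is proved, stated in full; the proofs are below) =====
def Claim_equal_find_ghost_text_non_local : Prop := ∀ (completion : String) (cleaned_code_block : String) (relative_cursor_position : Int), Dom_find_ghost_text_non_local completion cleaned_code_block relative_cursor_position → Spec_find_ghost_text_non_local completion cleaned_code_block relative_cursor_position (find_ghost_text_non_local completion cleaned_code_block relative_cursor_position)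

-- ===== LEMMAS AND PROOFS =====

theorem ofList_eq_empty_iff (l : List Char) : (String.ofList l = "") ↔ l = [] := by
  constructor
  · intro h; have := congrArg String.toList h; simpa using this
  · rintro rfl; rfl

theorem if_ne_empty_collapse (x : String) : (if x ≠ "" then x else "") = x := by
  split <;> simp_all

theorem pvPfxLen_le (cl dl : List Char) : pvPfxLen cl dl ≤ dl.length ∧ pvPfxLen cl dl ≤ cl.length := by
  induction cl generalizing dl with
  | nil => cases dl <;> simp [pvPfxLen]
  | cons a as ih =>
    cases dl with
    | nil => simp [pvPfxLen]
    | cons b bs =>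
      simp only [pvPfxLen, List.length_cons]
      split
      · have := ih bs; omega
      · omega

theorem pfx_le_iff (cl dl : List Char) (k : Nat) (hk : k ≤ dl.length) (hmn : dl.length ≤ cl.length) :
    (dl.take k <+: cl ↔ k ≤ pvPfxLen cl dl) := by
  induction k generalizing cl dl with
  | zero => simp
  | succ k ih =>
    cases dl with
    | nil => simp at hk
    | cons b bs =>
      cases cl with
      | nil => simp at hmn
      | cons a as =>
        simp only [List.take_succ_cons, List.cons_prefix_cons, pvPfxLen]
        by_cases hab : a = b
        · rw [if_pos hab]
          simp only [List.length_cons] at hk hmn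
          rw [ih as bs (by omega) (by omega)]
          constructor
          · rintro ⟨-, h⟩; omega
          · intro h; exact ⟨hab.symm, by omega⟩
        · rw [if_neg hab]
          constructor
          · rintro ⟨h, -⟩; exact absurd h.symm hab
          · omega

theorem sfx_le_iff (cl dl : List Char) (k : Nat) (hk : k ≤ dl.length) (hmn : dl.length ≤ cl.length) :
    (dl.drop k <:+ cl ↔ dl.length - k ≤ pvPfxLen cl.reverse dl.reverse) := by
  rw [← List.reverse_prefix, List.reverse_drop]
  exact pfx_le_iff cl.reverse dl.reverse (dl.length - k) (by simp) (by simpa)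

theorem ghost_eq (co cc : String) (pos : Int) (h0 : 0 ≤ pos)
    (hm : pos.toNat ≤ cc.toList.length) (hmn : cc.toList.length ≤ co.toList.length) :
    get_ghost_text_with_location co cc pos =
      if cc.toList.take pos.toNat <+: co.toList ∧ cc.toList.drop pos.toNat <:+ co.toList then
        String.ofList ((co.toList.drop pos.toNat).take (co.toList.length - cc.toList.length))
      else "" := by
  set cl := co.toList with hcl
  set dl := cc.toList with hdl
  set k := pos.toNat
  set n := cl.length with hn
  set m := dl.length with hmm
  have hpos : pos = (k : Int) := (Int.toNat_of_nonneg h0).symm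
  have hsl1 : PySem.Str.slice cc none (some pos) = String.ofList (dl.take k) := by
    apply String.toList_injective; simp [PySem.Str.toList_slice, hpos]; rw [← hdl]
  have hsl2 : PySem.Str.slice cc (some pos) none = String.ofList (dl.drop k) := by
    apply String.toList_injective; simp [PySem.Str.toList_slice, hpos]; rw [← hdl]
  unfold get_ghost_text_with_location
  rw [hsl1, hsl2]
  simp only [PySem.Str.startswith_eq, PySem.Str.endswith_eq, String.toList_ofList, ← hcl]
  by_cases hc : dl.take k <+: cl ∧ dl.drop k <:+ cl
  · have hb : (PySem.Chars.startswith cl (dl.take k) && PySem.Chars.endswith cl (dl.drop k)) = true := by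
      rw [Bool.and_eq_true, PySem.Chars.startswith_iff, PySem.Chars.endswith_iff]; exact hc
    rw [if_pos hb, if_pos hc, if_ne_empty_collapse]
    have hkn : k ≤ n := by
      have h1 := hc.1.length_le; rw [List.length_take] at h1; omega
    have hlenpfx : PySem.Str.len (String.ofList (dl.take k)) = (k : Int) := by
      simp; omega
    have hlensfx : PySem.Str.len (String.ofList (dl.drop k)) = ((m - k : Nat) : Int) := by
      simp [← hmm]
    rw [hlenpfx, hlensfx]
    by_cases hkm : k = m
    · have hdrop : dl.drop k = [] := by simp [hkm, ← hmm]
      rw [if_neg (by simp [hdrop])]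
      apply String.toList_injective
      simp only [PySem.Str.toList_slice, String.toList_ofList]
      show PySem.List.slice cl (some (k : Int)) none = _
      rw [PySem.List.slice_from_natCast]
      rw [List.take_of_length_le (by simp [← hn]; omega)]
    · have hkm' : k < m := lt_of_le_of_ne hm hkm
      rw [if_pos (by simp; omega)]
      apply String.toList_injective
      simp only [PySem.Str.toList_slice, String.toList_ofList]
      show PySem.List.slice cl (some (k : Int)) (some (-((m - k : Nat) : Int))) = _
      simp only [PySem.List.slice, PySem.List.clampIdx_neg_natCast _ _ (show 0 < m - k by omega),
        PySem.List.clampIdx_natCast]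
      rw [min_eq_left (show k ≤ cl.length by omega)]
      congr 1
      omega
  · have hb : (PySem.Chars.startswith cl (dl.take k) && PySem.Chars.endswith cl (dl.drop k)) = false := by
      rw [Bool.and_eq_false_iff]
      by_contra h
      rw [not_or] at h
      simp only [Bool.not_eq_false] at h
      exact hc ⟨(PySem.Chars.startswith_iff _ _).1 (by simpa using h.1),
                (PySem.Chars.endswith_iff _ _).1 (by simpa using h.2)⟩
    rw [if_neg (by simp [hb]), if_neg hc]

theorem ghost_ne_iff (co cc : String) (pos : Int) (h0 : 0 ≤ pos)
    (hm : pos.toNat ≤ cc.toList.length) (hmn : cc.toList.length ≤ co.toList.length) :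
    (get_ghost_text_with_location co cc pos ≠ "") ↔
      (pos.toNat ≤ pvPfxLen co.toList cc.toList ∧
       cc.toList.length - pos.toNat ≤ pvPfxLen co.toList.reverse cc.toList.reverse ∧
       cc.toList.length < co.toList.length) := by
  rw [ghost_eq co cc pos h0 hm hmn]
  rw [← pfx_le_iff co.toList cc.toList pos.toNat hm hmn,
      ← sfx_le_iff co.toList cc.toList pos.toNat hm hmn]
  by_cases hc : cc.toList.take pos.toNat <+: co.toList ∧ cc.toList.drop pos.toNat <:+ co.toList
  · rw [if_pos hc]
    simp only [ne_eq, ofList_eq_empty_iff, List.take_eq_nil_iff, List.drop_eq_nil_iff]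
    constructor
    · intro h; exact ⟨hc.1, hc.2, by omega⟩
    · intro h; omega
  · rw [if_neg hc]
    simp only [ne_eq, not_true_eq_false, false_iff]
    intro h
    exact hc ⟨h.1, h.2.1⟩

set_option maxHeartbeats 1000000 in
theorem main_eq (completion cleaned_code_block : String) (rcp : Int) :
    find_ghost_text_non_local completion cleaned_code_block rcp
      = find_ghost_text_non_local_alt completion cleaned_code_block rcp := by
  set cl := completion.toList with hcl
  set dl := cleaned_code_block.toList with hdl
  set n := cl.length with hn
  set m := dl.length with hm
  set P := pvPfxLen cl dl with hP
  set S := pvPfxLen cl.reverse dl.reverse with hS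
  unfold find_ghost_text_non_local find_ghost_text_non_local_alt
  simp only [PySem.Str.len_eq, ← hcl, ← hdl, ← hn, ← hm, ← hP, ← hS]
  by_cases hgt : n < m
  · rw [if_pos (by exact_mod_cast hgt), if_pos (by omega)]
  · have hmn : m ≤ n := by omega
    rw [if_neg (by omega)]
    rw [PySem.List.foldl_append_ite
      (p := fun pos => get_ghost_text_with_location completion cleaned_code_block pos ≠ "")
      (f := fun pos => (pos, get_ghost_text_with_location completion cleaned_code_block pos))]
    rw [List.filter_congr (l := PySem.List.pyRange 0 (↑m + 1) 1)
      (q := fun pos => decide (pos.toNat ≤ P ∧ m - pos.toNat ≤ S ∧ m < n))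
      (by
        intro pos hpos
        rw [PySem.List.mem_pyRange_one] at hpos
        apply decide_eq_decide.mpr
        exact ghost_ne_iff completion cleaned_code_block pos hpos.1
          (by rw [← hdl, ← hm]; omega) (by rw [← hcl, ← hdl, ← hn, ← hm]; exact hmn))]
    simp only [List.nil_append]
    by_cases hlt : m < n
    · rw [if_neg (by omega)]
      by_cases hfeas : m - P ≤ S
      · rw [if_pos hfeas]
        have hPm : P ≤ m := (pvPfxLen_le cl dl).1
        have hPmem : (P : Int) ∈ (PySem.List.pyRange 0 (↑m + 1) 1).filter
            (fun pos => decide (pos.toNat ≤ P ∧ m - pos.toNat ≤ S ∧ m < n)) := by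
          rw [List.mem_filter, PySem.List.mem_pyRange_one]
          refine ⟨⟨by positivity, by omega⟩, by simp; omega⟩
        have hmem : ((P : Int), get_ghost_text_with_location completion cleaned_code_block (P : Int)) ∈
            ((PySem.List.pyRange 0 (↑m + 1) 1).filter
              (fun pos => decide (pos.toNat ≤ P ∧ m - pos.toNat ≤ S ∧ m < n))).map
              (fun pos => (pos, get_ghost_text_with_location completion cleaned_code_block pos)) :=
          List.mem_map_of_mem hPmem
        obtain ⟨x, hx⟩ : ∃ x, PySem.List.max?
            (((PySem.List.pyRange 0 (↑m + 1) 1).filter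
              (fun pos => decide (pos.toNat ≤ P ∧ m - pos.toNat ≤ S ∧ m < n))).map
              (fun pos => (pos, get_ghost_text_with_location completion cleaned_code_block pos)))
            (fun x => x.1) = some x := by
          cases hmax : PySem.List.max? _ (fun x : Int × String => x.1) with
          | none =>
            rw [PySem.List.max?_eq_none_iff] at hmax
            rw [hmax] at hmem
            simp at hmem
          | some x => exact ⟨x, rfl⟩
        rw [hx]
        obtain ⟨pos, hposf, hfx⟩ := List.mem_map.1 (PySem.List.max?_mem hx)
        obtain ⟨x1, x2⟩ := x
        have h1 : pos = x1 := congrArg Prod.fst hfx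
        have h2 : get_ghost_text_with_location completion cleaned_code_block pos = x2 :=
          congrArg Prod.snd hfx
        subst h1
        rw [List.mem_filter, PySem.List.mem_pyRange_one] at hposf
        have hq := of_decide_eq_true hposf.2
        have hpos0 := hposf.1.1
        have hle : (P : Int) ≤ pos := PySem.List.max?_isMax hx _ hmem
        have hposP : pos = (P : Int) := by omega
        subst hposP
        show (x2, (P : Int)) = _
        rw [← h2]
        refine Prod.ext ?_ rfl
        show get_ghost_text_with_location completion cleaned_code_block (P : Int) = _
        rw [ghost_eq completion cleaned_code_block (P : Int) (by positivity)
          (by rw [← hdl, ← hm]; simp; omega) (by rw [← hcl, ← hdl, ← hn, ← hm]; omega)]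
        rw [if_pos]
        · simp only [← hcl, ← hdl, ← hn, ← hm, Int.toNat_natCast]
        · simp only [Int.toNat_natCast]
          exact ⟨(pfx_le_iff cl dl P ((pvPfxLen_le cl dl).1) hmn).2 le_rfl,
                 (sfx_le_iff cl dl P ((pvPfxLen_le cl dl).1) hmn).2 (by omega)⟩
      · rw [if_neg hfeas]
        have hnil : ((PySem.List.pyRange 0 (↑m + 1) 1).filter
            (fun pos => decide (pos.toNat ≤ P ∧ m - pos.toNat ≤ S ∧ m < n))) = [] := by
          apply List.filter_eq_nil_iff.mpr
          intro a _
          simp only [decide_eq_true_eq]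
          omega
        rw [hnil]
        simp only [List.map_nil]
        rw [show PySem.List.max? ([] : List (Int × String)) (fun x => x.1) = none from
          (PySem.List.max?_eq_none_iff _ _).2 rfl]
    · have hmeq : m = n := by omega
      rw [if_pos (by omega)]
      have hnil : ((PySem.List.pyRange 0 (↑m + 1) 1).filter
          (fun pos => decide (pos.toNat ≤ P ∧ m - pos.toNat ≤ S ∧ m < n))) = [] := by
        apply List.filter_eq_nil_iff.mpr
        intro a _
        simp only [decide_eq_true_eq]
        omega
      rw [hnil]
      simp only [List.map_nil]
      rw [show PySem.List.max? ([] : List (Int × String)) (fun x => x.1) = none from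
        (PySem.List.max?_eq_none_iff _ _).2 rfl]

-- ===== VERDICT (by name: the statement is the Claim_ definition above) =====
theorem find_ghost_text_non_local_spec : Claim_equal_find_ghost_text_non_local := by
  intro completion cleaned_code_block rcp _
  exact main_eq completion cleaned_code_block rcp
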